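-- pv_equiv track=rewrite | github.com/GitMaster9/veprad | create_dictionary.py | process_word
-- ===== SOURCE A (Python) =====
-- def process_word(word):
--     special_words = {
--         '!ENTER': 'sil',
--         '!EXIT': 'sil',
--         '<sil>': 'sil',
--         '<uzdah>': 'uzdah',
--         '<papir>': 'papir',
--         '<glazba>': 'glazba',
--     }
--
--     for old, new in special_words.items():
--         if word == old:
--             return new
--
--     # Replace special characters if needed
--     # For example, replace '@' with 'at' and '&' with 'and'
--     replacements = {
--         '{': 'S',
--         '~': 'C',
--         '^': 'cc',
--         '`': 'Z',
--         '}': 'dz',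
--     }
--
--     # Separate every letter by a space
--     spaced_word = ' '.join(list(word))
--
--     for old, new in replacements.items():
--         spaced_word = spaced_word.replace(old, new)
--
--     return spaced_word
-- ===== SOURCE B (Python) =====
-- def process_word(word):
--     # Special tokens: the three silence markers share one answer; the other
--     # three bracketed tokens map to their own name with the <> stripped.
--     if word in ('!ENTER', '!EXIT', '<sil>'):
--         return 'sil'
--     if word in ('<uzdah>', '<papir>', '<glazba>'):
--         return word[1:-1]
--     # One loop with an accumulator: emit the separator ourselves and translate
--     # each character with an if/elif chain (no dicts, no join-with-sep, no replace).
--     out = []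
--     for ch in word:
--         if out:
--             out.append(' ')
--         if ch == '{':
--             out.append('S')
--         elif ch == '~':
--             out.append('C')
--         elif ch == '^':
--             out.append('cc')
--         elif ch == '`':
--             out.append('Z')
--         elif ch == '}':
--             out.append('dz')
--         else:
--             out.append(ch)
--     return ''.join(out)
-- ===== Notes on version B (the rewrite author's own statement) =====
-- stated objective: alternative
-- what changed: B drops both dicts: the three silence tokens are answered by one tuple-membership check, the other three bracketed tokens by stripping the angle brackets with word[1:-1], and the body is one accumulator loop that emits the space separator itself and translates each character with an if/elif chain before a plain join with the empty separator - no spaced intermediate string and no str.replace rescans.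
import Mathlib
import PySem

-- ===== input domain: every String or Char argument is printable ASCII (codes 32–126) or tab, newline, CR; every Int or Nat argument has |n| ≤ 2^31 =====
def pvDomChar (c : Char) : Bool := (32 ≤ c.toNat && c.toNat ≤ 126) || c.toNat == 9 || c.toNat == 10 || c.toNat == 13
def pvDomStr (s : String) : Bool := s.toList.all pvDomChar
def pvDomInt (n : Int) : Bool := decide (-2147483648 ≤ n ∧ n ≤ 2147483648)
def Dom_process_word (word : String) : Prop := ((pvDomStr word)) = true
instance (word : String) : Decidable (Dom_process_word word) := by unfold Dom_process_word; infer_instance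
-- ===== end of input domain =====

-- B drops both dicts: a tuple-membership check and bracket-stripping word[1:-1] for the
-- special tokens, then one accumulator loop emitting its own separators with an if/elif
-- chain per character and a plain ''.join — no spaced string, no str.replace rescans
-- (objective: alternative decomposition, not claimed faster).

-- ===== PORT A =====
def process_word (word : String) : String :=
  -- the for-loop over special_words.items() unrolled over the literal dict, in insertion order
  if word = "!ENTER" then "sil"
  else if word = "!EXIT" then "sil"
  else if word = "<sil>" then "sil"
  else if word = "<uzdah>" then "uzdah"
  else if word = "<papir>" then "papir"
  else if word = "<glazba>" then "glazba"
  else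
    -- spaced_word = ' '.join(list(word))
    let spaced := PySem.Str.join " " (word.toList.map (fun c => String.ofList [c]))
    -- the for-loop over replacements.items(): five successive str.replace passes
    let s1 := PySem.Str.replace spaced "{" "S"
    let s2 := PySem.Str.replace s1 "~" "C"
    let s3 := PySem.Str.replace s2 "^" "cc"
    let s4 := PySem.Str.replace s3 "`" "Z"
    PySem.Str.replace s4 "}" "dz"

-- ===== PORT B =====
-- the if/elif chain translating one character
def pwSub (ch : Char) : String :=
  if ch = '{' then "S"
  else if ch = '~' then "C"
  else if ch = '^' then "cc"
  else if ch = '`' then "Z"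
  else if ch = '}' then "dz"
  else String.ofList [ch]

-- one iteration of B's loop: 'if out: out.append(" ")' then append the translated char
def pwStep (acc : List String) (ch : Char) : List String :=
  (if acc ≠ [] then acc ++ [" "] else acc) ++ [pwSub ch]

def process_word_alt (word : String) : String :=
  if word = "!ENTER" ∨ word = "!EXIT" ∨ word = "<sil>" then "sil"
  else if word = "<uzdah>" ∨ word = "<papir>" ∨ word = "<glazba>" then
    String.ofList (PySem.List.slice word.toList (some 1) (some (-1)))   -- word[1:-1]
  else
    PySem.Str.join "" (word.toList.foldl pwStep [])   -- ''.join(out)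

-- ===== PRECONDITION & SPEC =====
def Spec_process_word (word : String) (out : String) : Prop := out = process_word_alt word
instance (word : String) (out : String) : Decidable (Spec_process_word word out) := by unfold Spec_process_word; infer_instance

-- ===== CLAIM (what is proved, stated in full; the proofs are below) =====
def Claim_equal_process_word : Prop := ∀ (word : String), Dom_process_word word → Spec_process_word word (process_word word)

-- ===== LEMMAS AND PROOFS =====

-- replace with a single-char pattern: one step of the fuelled scanner
theorem pv_go_cons (o : Char) (new : List Char) (c : Char) (t acc : List Char) (n : Nat) :
    PySem.Chars.replace.go [o] new (n+1) (c :: t) acc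
    = if c = o then PySem.Chars.replace.go [o] new n t (new.reverse ++ acc)
      else PySem.Chars.replace.go [o] new n t (c :: acc) := by
  rw [PySem.Chars.replace.go]
  by_cases h : c = o
  · simp [h, List.isPrefixOf]
  · simp only [List.isPrefixOf]
    rw [if_neg, if_neg h]
    simp [beq_iff_eq]
    exact fun h' => absurd h'.symm h

theorem pv_go_nil (o : Char) (new acc : List Char) (n : Nat) :
    PySem.Chars.replace.go [o] new n [] acc = acc.reverse := by
  cases n <;> (rw [PySem.Chars.replace.go]; simp)

-- replace with a single-char pattern IS a flatMap of the per-char substitution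
theorem pv_go_flatMap (o : Char) (new : List Char) :
    ∀ (l : List Char) (fuel : Nat) (acc : List Char), l.length ≤ fuel →
      PySem.Chars.replace.go [o] new fuel l acc
        = acc.reverse ++ l.flatMap (fun c => if c = o then new else [c])
  | [], fuel, acc, _ => by simp [pv_go_nil]
  | c :: t, fuel, acc, h => by
    cases fuel with
    | zero => simp at h
    | succ n =>
      rw [pv_go_cons]
      by_cases hc : c = o
      · rw [if_pos hc, pv_go_flatMap o new t n (new.reverse ++ acc) (by simpa using h)]
        simp [hc]
      · rw [if_neg hc, pv_go_flatMap o new t n (c :: acc) (by simpa using h)]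
        simp [hc]

theorem pv_replace_single (l : List Char) (o : Char) (new : List Char) :
    PySem.Chars.replace l [o] new = l.flatMap (fun c => if c = o then new else [c]) := by
  rw [PySem.Chars.replace]
  simp [pv_go_flatMap o new l l.length [] (le_refl _)]

-- the composed effect of A's five replaces on one character
def pvSubst (c : Char) : List Char :=
  if c = '{' then ['S'] else if c = '~' then ['C'] else if c = '^' then ['c','c']
  else if c = '`' then ['Z'] else if c = '}' then ['d','z'] else [c]

-- running replaces 2..5 over the first substitution's output changes nothing
-- (replacement outputs avoid the later patterns)
theorem pv_chain_on_subst (c : Char) :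
    List.flatMap (fun d => if d = '}' then ['d','z'] else [d])
      (List.flatMap (fun d => if d = '`' then ['Z'] else [d])
        (List.flatMap (fun d => if d = '^' then ['c','c'] else [d])
          (List.flatMap (fun d => if d = '~' then ['C'] else [d])
            (if c = '{' then ['S'] else [c])))) = pvSubst c := by
  unfold pvSubst
  by_cases h1 : c = '{'; · simp [h1]
  by_cases h2 : c = '~'; · simp [h2]
  by_cases h3 : c = '^'; · simp [h3]
  by_cases h4 : c = '`'; · simp [h4]
  by_cases h5 : c = '}'; · simp [h5]
  simp [h1, h2, h3, h4, h5]

theorem pv_intercalate_cons_cons (sep x y : List Char) (ys : List (List Char)) :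
    List.intercalate sep (x :: y :: ys) = x ++ sep ++ List.intercalate sep (y :: ys) := by
  simp [List.intercalate, List.intersperse]

-- the spaced-then-replaced char list IS the intercalation of the per-char substitutions
theorem pv_main (cs : List Char) :
    (((((List.intercalate [' '] (cs.map (fun c => [c]))).flatMap
          (fun d => if d = '{' then ['S'] else [d])).flatMap
          (fun d => if d = '~' then ['C'] else [d])).flatMap
          (fun d => if d = '^' then ['c','c'] else [d])).flatMap
          (fun d => if d = '`' then ['Z'] else [d])).flatMap
          (fun d => if d = '}' then ['d','z'] else [d])
      = List.intercalate [' '] (cs.map pvSubst) := by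
  induction cs with
  | nil => simp [List.intercalate]
  | cons x xs ih =>
    cases xs with
    | nil =>
      simp only [List.map_cons, List.map_nil, show ∀ (l : List Char),
        List.intercalate [' '] [l] = l from fun l => by simp [List.intercalate],
        List.flatMap_singleton]
      exact pv_chain_on_subst x
    | cons y ys =>
      have hsp : ∀ (o : Char) (nw : List Char), o ≠ ' ' →
          ([' '] : List Char).flatMap (fun d => if d = o then nw else [d]) = [' '] := by
        intro o nw ho; simp [Ne.symm ho]
      simp only [List.map_cons] at ih ⊢
      rw [pv_intercalate_cons_cons]
      simp only [List.flatMap_append, List.flatMap_singleton,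
        hsp '{' ['S'] (by decide), hsp '~' ['C'] (by decide),
        hsp '^' ['c','c'] (by decide), hsp '`' ['Z'] (by decide),
        hsp '}' ['d','z'] (by decide)]
      rw [pv_chain_on_subst x, ih, pv_intercalate_cons_cons]

-- B's if/elif chain computes the same per-char substitution
theorem pv_sub_toList (ch : Char) : (pwSub ch).toList = pvSubst ch := by
  unfold pwSub pvSubst
  split_ifs <;> simp

-- joining with the empty separator is flatten
theorem pv_chars_join_nil_sep : ∀ (l : List (List Char)), PySem.Chars.join [] l = l.flatten
  | [] => by rw [PySem.Chars.join_nil]; rfl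
  | [p] => by rw [PySem.Chars.join_singleton]; simp
  | p :: q :: rest => by
    rw [PySem.Chars.join_cons_cons, pv_chars_join_nil_sep (q :: rest)]
    simp

-- invariant of B's loop: with a nonempty accumulator, each further character
-- contributes a space and its substitution
theorem pv_loop : ∀ (cs : List Char) (acc : List String), acc ≠ [] →
    ((List.foldl pwStep acc cs).map String.toList).flatten
      = (acc.map String.toList).flatten ++ cs.flatMap (fun c => ' ' :: pvSubst c)
  | [], acc, _ => by simp
  | c :: t, acc, h => by
    simp only [List.foldl_cons]
    rw [show pwStep acc c = acc ++ [" ", pwSub c] from by simp [pwStep, h]]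
    rw [pv_loop t (acc ++ [" ", pwSub c]) (by simp)]
    simp [pv_sub_toList]

-- the intercalation as head ++ (space ++ substitution) pieces
theorem pv_intercalate_flatMap : ∀ (t : List Char) (c : Char),
    List.intercalate [' '] ((c :: t).map pvSubst)
      = pvSubst c ++ t.flatMap (fun d => ' ' :: pvSubst d)
  | [], c => by simp [List.intercalate]
  | y :: ys, c => by
    simp only [List.map_cons]
    rw [pv_intercalate_cons_cons]
    simp only [List.map_cons] at pv_intercalate_flatMap
    rw [pv_intercalate_flatMap ys y]
    simp

-- B's whole loop + join equals the intercalation of substitutions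
theorem pv_loopB : ∀ (cs : List Char),
    PySem.Chars.join [] ((cs.foldl pwStep []).map String.toList)
      = List.intercalate [' '] (cs.map pvSubst)
  | [] => by simp [List.intercalate, PySem.Chars.join_nil]
  | c :: t => by
    rw [pv_chars_join_nil_sep]
    simp only [List.foldl_cons]
    rw [show pwStep [] c = [pwSub c] from by simp [pwStep]]
    rw [pv_loop t [pwSub c] (by simp)]
    rw [pv_intercalate_flatMap]
    simp [pv_sub_toList]

theorem pv_nonspecial (word : String)
    (h1 : ¬ word = "!ENTER") (h2 : ¬ word = "!EXIT") (h3 : ¬ word = "<sil>")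
    (h4 : ¬ word = "<uzdah>") (h5 : ¬ word = "<papir>") (h6 : ¬ word = "<glazba>") :
    process_word word = process_word_alt word := by
  unfold process_word process_word_alt
  simp only [h1, h2, h3, h4, h5, h6, if_false, or_self]
  simp only [PySem.Str.replace, PySem.Str.join, String.toList_ofList, PySem.Chars.join,
    List.map_map]
  apply congrArg String.ofList
  rw [show ("{".toList) = ['{'] from rfl, show ("~".toList) = ['~'] from rfl,
    show ("^".toList) = ['^'] from rfl, show ("`".toList) = ['`'] from rfl,
    show ("}".toList) = ['}'] from rfl, show ("S".toList) = ['S'] from rfl,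
    show ("C".toList) = ['C'] from rfl, show ("cc".toList) = ['c','c'] from rfl,
    show ("Z".toList) = ['Z'] from rfl, show ("dz".toList) = ['d','z'] from rfl,
    show (" ".toList) = [' '] from rfl, show ("".toList) = ([] : List Char) from rfl]
  rw [pv_replace_single, pv_replace_single, pv_replace_single, pv_replace_single,
    pv_replace_single]
  have hA : (List.map (String.toList ∘ fun c => String.ofList [c]) word.toList)
      = word.toList.map (fun c => [c]) := by
    simp [Function.comp]
  rw [hA]
  have hB := pv_loopB word.toList
  simp only [PySem.Chars.join] at hB
  rw [hB]
  exact pv_main word.toList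

-- ===== VERDICT (by name: the statement is the Claim_ definition above) =====
theorem process_word_spec : Claim_equal_process_word := by
  intro word _
  unfold Spec_process_word
  by_cases h1 : word = "!ENTER"; · subst h1; decide
  by_cases h2 : word = "!EXIT"; · subst h2; decide
  by_cases h3 : word = "<sil>"; · subst h3; decide
  by_cases h4 : word = "<uzdah>"; · subst h4; decide
  by_cases h5 : word = "<papir>"; · subst h5; decide
  by_cases h6 : word = "<glazba>"; · subst h6; decide
  exact pv_nonspecial word h1 h2 h3 h4 h5 h6
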